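-- pv_equiv track=rewrite | github.com/corelli359/intent-router | backend/services/router-service/src/router_service/core/slots/extractor.py | _digit_spans
-- ===== SOURCE A (Python) =====
-- def _digit_spans(text: str) -> list[tuple[str, int, int]]:
--     """Return contiguous digit spans from one text fragment."""
--     spans: list[tuple[str, int, int]] = []
--     start: int | None = None
--     for index, character in enumerate(text):
--         if character.isdigit():
--             if start is None:
--                 start = index
--             continue
--         if start is not None:
--             spans.append((text[start:index], start, index))
--             start = None
--     if start is not None:
--         spans.append((text[start:], start, len(text)))
--     return spans
-- ===== SOURCE B (Python) =====
-- def _digit_spans(text: str) -> list[tuple[str, int, int]]: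
--     """Return contiguous digit spans from one text fragment."""
--     spans: list[tuple[str, int, int]] = []
--     i, n = 0, len(text)
--     while i < n:
--         if text[i].isdigit():
--             j = i + 1
--             while j < n and text[j].isdigit():
--                 j += 1
--             spans.append((text[i:j], i, j))
--             i = j
--         else:
--             i += 1
--     return spans
-- ===== Notes on version B (the rewrite author's own statement) =====
-- stated objective: alternative
-- what changed: Replaced the start/None sentinel state machine (with a separate trailing-flush branch) by a two-pointer run scanner: on meeting a digit an inner loop advances j past the whole run and the span is emitted immediately, so no pending-state flush is needed.
import Mathlib
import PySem

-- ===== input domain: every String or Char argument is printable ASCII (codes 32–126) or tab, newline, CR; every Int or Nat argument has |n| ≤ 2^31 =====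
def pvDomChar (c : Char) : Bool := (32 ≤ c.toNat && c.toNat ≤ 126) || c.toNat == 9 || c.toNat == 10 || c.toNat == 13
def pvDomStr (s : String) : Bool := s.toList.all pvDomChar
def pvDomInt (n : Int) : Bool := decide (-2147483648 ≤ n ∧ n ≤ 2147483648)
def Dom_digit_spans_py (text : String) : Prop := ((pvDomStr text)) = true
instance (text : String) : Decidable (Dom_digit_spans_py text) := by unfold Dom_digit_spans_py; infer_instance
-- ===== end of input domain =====

-- B replaces A's start/None sentinel state machine (with trailing flush) by a two-pointer
-- run scanner that emits each digit span as soon as its run ends; same cost, different control flow.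


-- ===== PORT A =====
-- one loop step of A: state = (spans so far, optional start of the current digit run)
def aStep (cs : List Char) (acc : List (String × Int × Int) × Option Int) (p : Int × Char) :
    List (String × Int × Int) × Option Int :=
  if PySem.Chars.isdigit p.2 then
    match acc.2 with
    | none => (acc.1, some p.1)
    | some _ => acc
  else
    match acc.2 with
    | some s => (acc.1 ++ [(String.ofList (PySem.List.slice cs (some s) (some p.1)), s, p.1)], none)
    | none => acc

-- A's trailing flush after the loop
def aFlush (cs : List Char) (st : List (String × Int × Int) × Option Int) :
    List (String × Int × Int) :=
  match st.2 with
  | some s => st.1 ++ [(String.ofList (PySem.List.slice cs (some s) none), s, (cs.length : Int))]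
  | none => st.1

def digit_spans_py (text : String) : List (String × Int × Int) :=
  aFlush text.toList ((PySem.List.enumerate text.toList 0).foldl (aStep text.toList) ([], none))

-- ===== PORT B =====
-- inner while loop of B: length of the leading digit run
def digitRun : List Char → Nat
  | [] => 0
  | c :: rest => if PySem.Chars.isdigit c then digitRun rest + 1 else 0

-- outer while loop of B over the suffix starting at index i
def altGo (cs : List Char) (i : Nat) : List Char → List (String × Int × Int)
  | [] => []
  | c :: rest =>
    if PySem.Chars.isdigit c then
      let k := digitRun rest
      (String.ofList (PySem.List.slice cs (some (i : Int)) (some ((i + 1 + k : Nat) : Int))),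
        (i : Int), ((i + 1 + k : Nat) : Int)) :: altGo cs (i + 1 + k) (rest.drop k)
    else altGo cs (i + 1) rest
termination_by l => l.length
decreasing_by
  · simp only [List.length_drop, List.length_cons]; omega
  · simp only [List.length_cons]; omega

def digit_spans_py_alt (text : String) : List (String × Int × Int) :=
  altGo text.toList 0 text.toList

-- ===== PRECONDITION & SPEC =====
def Spec_digit_spans_py (text : String) (out : List (String × Int × Int)) : Prop := out = digit_spans_py_alt text
instance (text : String) (out : List (String × Int × Int)) : Decidable (Spec_digit_spans_py text out) := by unfold Spec_digit_spans_py; infer_instance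

-- ===== CLAIM (what is proved, stated in full; the proofs are below) =====
def Claim_equal_digit_spans_py : Prop := ∀ (text : String), Dom_digit_spans_py text → Spec_digit_spans_py text (digit_spans_py text)

-- ===== LEMMAS AND PROOFS =====

-- Main invariant, both loop states at once: running A's fold over the suffix l = cs.drop i
-- (and then flushing) yields the spans B's scanner produces from position i.
theorem aLoop_invariant (cs : List Char) (l : List Char) :
    (∀ (i : Nat) (spans : List (String × Int × Int)), i ≤ cs.length → cs.drop i = l →
       aFlush cs ((PySem.List.enumerate l (i : Int)).foldl (aStep cs) (spans, none)) =
         spans ++ altGo cs i l)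
    ∧ (∀ (i s : Nat) (spans : List (String × Int × Int)), i ≤ cs.length → cs.drop i = l →
       aFlush cs ((PySem.List.enumerate l (i : Int)).foldl (aStep cs) (spans, some (s : Int))) =
         spans ++ (String.ofList (PySem.List.slice cs (some (s : Int)) (some ((i + digitRun l : Nat) : Int))),
             (s : Int), ((i + digitRun l : Nat) : Int)) :: altGo cs (i + digitRun l) (l.drop (digitRun l))) := by
  induction l with
  | nil =>
    constructor
    · intro i spans hi hdrop
      simp [PySem.List.enumerate, aFlush, altGo]
    · intro i s spans hi hdrop
      have hlen : i = cs.length := by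
        have := List.drop_eq_nil_iff.mp hdrop
        omega
      subst hlen
      simp only [PySem.List.enumerate, List.foldl_nil, aFlush, digitRun, Nat.add_zero,
        List.drop_nil, altGo]
      rw [PySem.List.slice_from_natCast, PySem.List.slice_natCast,
        List.take_of_length_le (by simp)]
  | cons c rest ih =>
    have hstep : ∀ (i : Nat), PySem.List.enumerate (c :: rest) (i : Int) =
        ((i : Int), c) :: PySem.List.enumerate rest ((i + 1 : Nat) : Int) := by
      intro i
      rw [PySem.List.enumerate_cons]
      push_cast
      ring_nf
    constructor
    · intro i spans hi hdrop
      have hi' : i < cs.length := by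
        by_contra h
        have : cs.drop i = [] := List.drop_eq_nil_iff.mpr (by omega)
        rw [hdrop] at this; simp at this
      have hdrop' : cs.drop (i + 1) = rest := by
        rw [← List.drop_drop, hdrop]; simp
      rw [hstep, List.foldl_cons]
      by_cases hd : PySem.Chars.isdigit c
      · simp only [aStep, hd, if_pos]
        rw [(ih.2) (i + 1) i spans (by omega) hdrop']
        simp [altGo, hd]
      · simp only [aStep, hd, if_neg, Bool.false_eq_true, not_false_eq_true]
        rw [(ih.1) (i + 1) spans (by omega) hdrop']
        simp [altGo, hd]
    · intro i s spans hi hdrop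
      have hi' : i < cs.length := by
        by_contra h
        have : cs.drop i = [] := List.drop_eq_nil_iff.mpr (by omega)
        rw [hdrop] at this; simp at this
      have hdrop' : cs.drop (i + 1) = rest := by
        rw [← List.drop_drop, hdrop]; simp
      rw [hstep, List.foldl_cons]
      by_cases hd : PySem.Chars.isdigit c
      · simp only [aStep, hd, if_pos]
        rw [(ih.2) (i + 1) s spans (by omega) hdrop']
        simp only [digitRun, hd, if_pos, List.drop_succ_cons]
        have harith : i + 1 + digitRun rest = i + (digitRun rest + 1) := by omega
        rw [harith]
      · simp only [aStep, hd, if_neg, Bool.false_eq_true, not_false_eq_true]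
        rw [(ih.1) (i + 1) (spans ++ [(String.ofList (PySem.List.slice cs (some (s : Int)) (some (i : Int))),
              (s : Int), (i : Int))]) (by omega) hdrop']
        simp only [digitRun, hd, Bool.false_eq_true, if_false, Nat.add_zero, List.drop_zero]
        simp only [altGo, hd, Bool.false_eq_true, if_false]
        simp

-- ===== VERDICT (by name: the statement is the Claim_ definition above) =====
theorem digit_spans_py_spec : Claim_equal_digit_spans_py := by
  intro text _
  unfold Spec_digit_spans_py digit_spans_py digit_spans_py_alt
  have h := (aLoop_invariant text.toList text.toList).1 0 [] (by omega) (by simp)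
  simpa using h
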